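-- pv_equiv track=rewrite | github.com/defgsus/processflow | processflow/runner/object_compare.py | subtract_valid_changes
-- ===== SOURCE A (Python) =====
-- def subtract_valid_changes(diff, valid_changes):
--     """
--     Remove any valid changes from diff (as gotten from get_difference())
--     `valid_changes` is a list of strings with format like:
--         'variable', 'object.*', 'object.variable', 'object.*.sub.another'
--     :param diff: dict with changes from get_difference()
--     :param valid_changes: list of str,
--     :return: new dict, containing all changes in `diff` that are not valid according to `valid_changes`
--     """
--     def _convert(key):
--         seq = tuple(key.split("."))
--         # reduce trailing .*.* to .*
--         while len(seq) > 1 and seq[-2:] == ("*", "*"):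
--             seq = seq[:-1]
--         return seq
--     valid = set(_convert(c) for c in valid_changes)
--
--     ret = dict()
--     for key in diff:
--         sequence = key.split(".")
--         if not sequence:
--             raise ValueError("Empty key in diff")
--
--         match = False
--
--         sub_valid = valid
--         for sub_key in sequence:
--
--             if ("*",) in sub_valid or (sub_key,) in sub_valid or (sub_key, "*") in sub_valid:
--                 match = True
--                 break
--
--             sub_valid = set(c[1:] for c in sub_valid if c[0] == sub_key or c[0] == "*")
--
--         if match:
--             continue
--
--         ret[key] = diff[key]
--     return ret
-- ===== SOURCE B (Python) =====
-- def subtract_valid_changes(diff, valid_changes):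
--     patterns = []
--     for c in valid_changes:
--         p = c.split(".")
--         t = 0
--         for a in reversed(p):
--             if a != "*":
--                 break
--             t += 1
--         if t >= 2:
--             p = p[:len(p) - t] + ["*"]
--         patterns.append(p)
--
--     # index patterns by their first component; "*"-initial ones match any first component
--     groups = {}
--     stars = []
--     for p in patterns:
--         if p[0] == "*":
--             stars.append(p)
--         else:
--             groups.setdefault(p[0], []).append(p)
--
--     def matches(p, seq):
--         return (len(p) <= len(seq) + 1
--                 and (len(p) <= len(seq) or p[-1] == "*")
--                 and all(a == "*" or a == b for a, b in zip(p, seq)))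
--
--     def keep(key):
--         seq = key.split(".")
--         cands = groups.get(seq[0], [])
--         return not (any(matches(p, seq) for p in cands)
--                     or any(matches(p, seq) for p in stars))
--
--     return {key: value for key, value in diff.items() if keep(key)}
-- ===== Notes on version B (the rewrite author's own statement) =====
-- stated objective: faster
-- what changed: A walks each key maintaining a shrinking set of pattern suffixes rebuilt per component; B normalizes the patterns once, indexes them by first component in a dict (plus a '*'-initial list), and tests each key only against its bucket with a closed-form wildcard-prefix predicate, so keys whose first component matches no pattern cost O(1) instead of a scan over all patterns.
import Mathlib
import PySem

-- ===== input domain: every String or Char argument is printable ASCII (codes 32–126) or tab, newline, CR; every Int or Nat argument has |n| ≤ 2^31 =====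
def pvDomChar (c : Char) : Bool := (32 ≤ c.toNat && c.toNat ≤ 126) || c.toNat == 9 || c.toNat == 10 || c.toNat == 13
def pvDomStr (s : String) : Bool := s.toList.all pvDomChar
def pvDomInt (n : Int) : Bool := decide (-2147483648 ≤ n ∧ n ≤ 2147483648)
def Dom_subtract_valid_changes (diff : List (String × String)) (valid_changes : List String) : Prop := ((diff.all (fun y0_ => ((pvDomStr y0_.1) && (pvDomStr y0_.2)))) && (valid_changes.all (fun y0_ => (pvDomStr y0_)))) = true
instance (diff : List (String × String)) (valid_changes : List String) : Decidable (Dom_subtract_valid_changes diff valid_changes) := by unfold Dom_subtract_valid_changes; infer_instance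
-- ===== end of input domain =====

-- B replaces A's per-component shrinking suffix-set walk by a direct per-pattern
-- closed-form wildcard-prefix test; equal return value on every input (objective: simpler).

-- ===== PORT A =====
-- key.split(".")  (sep ≠ "." is never empty, so split? is always some; .getD [] is exact)
def pvSplit (key : String) : List String := (PySem.Str.split? key ".").getD []

-- _convert's while loop: seq[-2:] == ("*","*") is seq.drop (len-2) = ["*","*"] (with len > 1),
-- and seq[:-1] is dropLast
def pvReduceA (seq : List String) : List String :=
  if _h : 1 < seq.length ∧ seq.drop (seq.length - 2) = ["*", "*"] then
    pvReduceA seq.dropLast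
  else seq
termination_by seq.length
decreasing_by simp only [List.length_dropLast]; omega

def pvConvert (key : String) : List String := pvReduceA (pvSplit key)

-- the 'for sub_key in sequence' loop of A: sub_valid is a PySem.Set of pattern suffixes.
-- Python's c[0] (IndexError on an empty tuple) is headD ""; exact because the suffix sets
-- built by A never contain an empty tuple.  c[1:] is drop 1.
def pvLoopA (seq : List String) (subValid : List (List String)) : Bool :=
  match seq with
  | [] => false
  | k :: rest =>
    if subValid.contains ["*"] || subValid.contains [k] || subValid.contains [k, "*"] then
      true
    else
      pvLoopA rest (PySem.Set.ofList
        ((subValid.filter (fun c => c.headD "" == k || c.headD "" == "*")).map (fun c => c.drop 1)))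

def subtract_valid_changes (diff : List (String × String)) (valid_changes : List String) : List (String × String) :=
  let valid : PySem.Set (List String) := PySem.Set.ofList (valid_changes.map (fun c => pvConvert c))
  let d := PySem.Dict.ofList diff
  -- 'if not sequence: raise ValueError' is unreachable: str.split always yields ≥ 1 piece.
  -- diff[key] is d.getD key ""; exact since key comes from d.keys.
  (d.keys.foldl (fun ret key =>
      if pvLoopA (pvSplit key) valid then ret
      else ret.insert key (d.getD key "")) PySem.Dict.empty).items

-- ===== PORT B =====
-- count of trailing "*" components (the reversed-loop in Source B)
def pvTrailStars (p : List String) : Nat := (p.reverse.takeWhile (fun a => a == "*")).length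

def pvReduceB (p : List String) : List String :=
  let t := pvTrailStars p
  if 2 ≤ t then p.take (p.length - t) ++ ["*"] else p

-- p matches seq iff p is a wildcard prefix of seq, or p is seq plus one extra "*"
def pvMatches (p seq : List String) : Bool :=
  decide (p.length ≤ seq.length + 1) &&
  (decide (p.length ≤ seq.length) || p.getLastD "" == "*") &&
  (p.zip seq).all (fun ab => ab.1 == "*" || ab.1 == ab.2)

-- the pattern index of Source B: a dict keyed by first component (setdefault(...).append is
-- Dict.modify with default []) plus the list of "*"-initial patterns; p[0] and seq[0] are
-- headD "" (exact: patterns and split results are never empty)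
def pvIndex (patterns : List (List String)) :
    PySem.Dict String (List (List String)) × List (List String) :=
  patterns.foldl (fun acc p =>
    if p.headD "" == "*" then (acc.1, acc.2 ++ [p])
    else (acc.1.modify (p.headD "") [] (fun l => l ++ [p]), acc.2))
    (PySem.Dict.empty, [])

def subtract_valid_changes_alt (diff : List (String × String)) (valid_changes : List String) : List (String × String) :=
  let patterns := valid_changes.map (fun c => pvReduceB (pvSplit c))
  let idx := pvIndex patterns
  (PySem.Dict.ofList diff).items.filter (fun kv =>
    let seq := pvSplit kv.1
    !(((idx.1.getD (seq.headD "") []).any (fun p => pvMatches p seq)) ||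
      idx.2.any (fun p => pvMatches p seq)))

-- ===== PRECONDITION & SPEC =====
def Spec_subtract_valid_changes (diff : List (String × String)) (valid_changes : List String) (out : List (String × String)) : Prop := out = subtract_valid_changes_alt diff valid_changes
instance (diff : List (String × String)) (valid_changes : List String) (out : List (String × String)) : Decidable (Spec_subtract_valid_changes diff valid_changes out) := by unfold Spec_subtract_valid_changes; infer_instance

-- ===== CLAIM (what is proved, stated in full; the proofs are below) =====
def Claim_equal_subtract_valid_changes : Prop := ∀ (diff : List (String × String)) (valid_changes : List String), Dom_subtract_valid_changes diff valid_changes → Spec_subtract_valid_changes diff valid_changes (subtract_valid_changes diff valid_changes)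

-- ===== LEMMAS AND PROOFS =====

-- str.split(sep) always returns at least one piece
lemma pvSplitOnGo_ne_nil (sep : List Char) (fuel : Nat) (l cur : List Char) (acc : List (List Char)) :
    PySem.Chars.splitOn.go sep fuel l cur acc ≠ [] := by
  induction fuel generalizing l cur acc with
  | zero => simp [PySem.Chars.splitOn.go]
  | succ n ih =>
    cases l with
    | nil => simp [PySem.Chars.splitOn.go]
    | cons c rest =>
      rw [PySem.Chars.splitOn.go]
      split
      · exact ih _ _ _
      · exact ih _ _ _

lemma pvSplit_ne_nil (key : String) : pvSplit key ≠ [] := by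
  simp only [pvSplit, PySem.Str.split?, PySem.Chars.split?, PySem.Chars.splitOn]
  simp only [List.isEmpty_iff]
  intro h
  have := pvSplitOnGo_ne_nil (".".toList) (key.toList.length + 1) key.toList [] []
  simp_all

-- reverse-side reformulation of A's trailing-star reduction
def pvG : List String → List String
  | a :: b :: rest => if a = "*" ∧ b = "*" then pvG (b :: rest) else a :: b :: rest
  | r => r

-- reverse-side reformulation of B's trailing-star reduction
def pvH (r : List String) : List String :=
  let t := (r.takeWhile (fun a => a == "*")).length
  if 2 ≤ t then "*" :: r.drop t else r


lemma pvCond_iff (s : List String) :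
    (1 < s.length ∧ s.drop (s.length - 2) = ["*", "*"]) ↔ ∃ t, s.reverse = "*" :: "*" :: t := by
  constructor
  · rintro ⟨h1, h2⟩
    have hrev : (s.drop (s.length - 2)).reverse = s.reverse.take (s.length - (s.length - 2)) := by
      rw [List.reverse_drop]
    rw [h2] at hrev
    have h3 : s.length - (s.length - 2) = 2 := by omega
    rw [h3] at hrev
    refine ⟨s.reverse.drop 2, ?_⟩
    calc s.reverse = s.reverse.take 2 ++ s.reverse.drop 2 := (List.take_append_drop 2 s.reverse).symm
    _ = "*" :: "*" :: s.reverse.drop 2 := by rw [← hrev]; rfl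
  · rintro ⟨t, ht⟩
    have hl : 1 < s.length := by
      have := congrArg List.length ht
      simp at this; omega
    refine ⟨hl, ?_⟩
    have hrev : (s.drop (s.length - 2)).reverse = s.reverse.take (s.length - (s.length - 2)) := by
      rw [List.reverse_drop]
    have h3 : s.length - (s.length - 2) = 2 := by omega
    rw [h3, ht] at hrev
    have h4 : (s.drop (s.length - 2)).reverse = ["*", "*"] := hrev
    have := congrArg List.reverse h4
    simpa using this

lemma pvReduceA_rev (s : List String) : pvReduceA s = (pvG s.reverse).reverse := by
  by_cases h : 1 < s.length ∧ s.drop (s.length - 2) = ["*", "*"]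
  · obtain ⟨t, ht⟩ := (pvCond_iff s).mp h
    rw [pvReduceA, dif_pos h, pvReduceA_rev s.dropLast]
    have hdl : s.dropLast.reverse = "*" :: t := by
      rw [Eq.symm List.tail_reverse, ht]; rfl
    rw [ht, hdl, pvG, if_pos ⟨rfl, rfl⟩]
  · rw [pvReduceA, dif_neg h]
    have hfix : pvG s.reverse = s.reverse := by
      cases hr : s.reverse with
      | nil => rfl
      | cons a r =>
        cases r with
        | nil => rfl
        | cons b rest =>
          rw [pvG, if_neg]
          rintro ⟨ha, hb⟩
          exact h ((pvCond_iff s).mpr ⟨rest, by rw [hr, ha, hb]⟩)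
    rw [hfix, List.reverse_reverse]
termination_by s.length
decreasing_by simp only [List.length_dropLast]; omega

lemma pvReduceB_rev (s : List String) : pvReduceB s = (pvH s.reverse).reverse := by
  simp only [pvReduceB, pvH, pvTrailStars]
  by_cases h : 2 ≤ (s.reverse.takeWhile (fun a => a == "*")).length
  · rw [if_pos h, if_pos h]
    simp only [List.reverse_cons]
    rw [List.reverse_drop, List.reverse_reverse, List.length_reverse]
  · rw [if_neg h, if_neg h, List.reverse_reverse]

lemma pvG_eq_pvH (r : List String) : pvG r = pvH r := by
  induction r with
  | nil => simp [pvG, pvH]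
  | cons a r ih =>
    cases r with
    | nil => simp [pvG, pvH, List.takeWhile]; split <;> simp_all
    | cons b rest =>
      by_cases hab : a = "*" ∧ b = "*"
      · obtain ⟨ha, hb⟩ := hab
        subst ha hb
        rw [pvG, if_pos ⟨rfl, rfl⟩, ih, pvH, pvH]
        simp only [List.takeWhile_cons, beq_self_eq_true, if_true]
        by_cases h2 : 2 ≤ (List.takeWhile (fun a => a == "*") rest).length + 1
        · have h3 : 2 ≤ (List.takeWhile (fun a => a == "*") rest).length + 1 + 1 := by omega
          simp only [List.length_cons, if_pos h2, if_pos h3, List.drop_succ_cons]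
        · have h0 : (List.takeWhile (fun a => a == "*") rest).length = 0 := by omega
          simp only [List.length_cons, List.drop_succ_cons, h0, List.drop_zero]
          norm_num
      · rw [pvG, if_neg hab, pvH]
        rcases (not_and_or.mp hab) with ha | hb
        · simp [ha]
        · by_cases ha : a = "*"
          · simp [ha, hb]
          · simp [ha]

lemma pvReduce_eq (s : List String) : pvReduceA s = pvReduceB s := by
  rw [pvReduceA_rev, pvReduceB_rev, pvG_eq_pvH]

-- pattern shape invariants after reduction
lemma pvReduceB_ne_nil (p : List String) (hp : p ≠ []) : pvReduceB p ≠ [] := by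
  by_cases h : 2 ≤ pvTrailStars p
  · simp [pvReduceB, h]
  · simp [pvReduceB, h, hp]

lemma pvDrop_takeWhile (r : List String) (q : String → Bool) :
    r.drop ((r.takeWhile q).length) = r.dropWhile q := by
  conv_lhs => rw [← List.takeWhile_append_dropWhile (p := q) (l := r)]
  rw [List.drop_left']
  rw [List.takeWhile_append_dropWhile]

lemma pvH_no_prefix (r : List String) : ¬ ∃ u, pvH r = "*" :: "*" :: u := by
  simp only [pvH]
  by_cases h : 2 ≤ (r.takeWhile (fun a => a == "*")).length
  · rw [if_pos h]
    rintro ⟨u, hu⟩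
    rw [pvDrop_takeWhile] at hu
    cases hd : r.dropWhile (fun a => a == "*") with
    | nil => rw [hd] at hu; cases hu
    | cons a u' =>
      rw [hd] at hu
      have ha : a = "*" := by
        simp only [List.cons.injEq] at hu
        exact hu.2.1
      have hhead := List.head_dropWhile_not (p := fun a => a == "*") (l := r) (by simp [hd])
      have h2 : (List.dropWhile (fun a => a == "*") r).head (by simp [hd]) = a := by simp [hd]
      rw [h2, ha] at hhead
      simp at hhead
  · rw [if_neg h]
    rintro ⟨u, hu⟩
    rw [hu] at h
    simp at h

lemma pvReduceB_no_ss (p : List String) : ¬ ∃ t, pvReduceB p = t ++ ["*", "*"] := by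
  rintro ⟨t, ht⟩
  rw [pvReduceB_rev] at ht
  apply pvH_no_prefix p.reverse
  refine ⟨t.reverse, ?_⟩
  have := congrArg List.reverse ht
  simpa using this

-- any over a Python set = any over the underlying list
lemma pvAny_ofList {α : Type} [BEq α] [LawfulBEq α] (l : List α) (q : α → Bool) :
    (PySem.Set.ofList l).any q = l.any q := by
  cases h : l.any q with
  | true =>
    rw [List.any_eq_true] at h ⊢
    obtain ⟨x, hx, hq⟩ := h
    exact ⟨x, (PySem.Set.mem_ofList l x).mpr hx, hq⟩
  | false =>
    rw [List.any_eq_false] at h ⊢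
    intro x hx
    exact h x ((PySem.Set.mem_ofList l x).mp hx)

-- the heart: A's suffix-set walk computes "some pattern matches" in B's closed-form sense
lemma pvLoopA_eq_any (seq : List String) (S : List (List String))
    (hinv : ∀ c ∈ S, c ≠ [] ∧ ¬ ∃ t, c = t ++ ["*", "*"])
    (hstar : seq = [] → ["*"] ∉ S) :
    pvLoopA seq S = S.any (fun c => pvMatches c seq) := by
  induction seq generalizing S with
  | nil =>
    rw [pvLoopA]
    symm
    rw [List.any_eq_false]
    intro c hc
    obtain ⟨hne, hss⟩ := hinv c hc
    cases c with
    | nil => exact absurd rfl hne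
    | cons x cs =>
      cases cs with
      | nil =>
        by_cases hx : x = "*"
        · subst hx; exact absurd hc (hstar rfl)
        · simp [pvMatches, hx]
      | cons y ys => simp [pvMatches]
  | cons k rest ih =>
    rw [pvLoopA]
    by_cases hc : (S.contains ["*"] || S.contains [k] || S.contains [k, "*"]) = true
    · rw [if_pos hc]
      symm
      rw [List.any_eq_true]
      rcases Bool.or_eq_true_iff.mp hc with h12 | h3
      · rcases Bool.or_eq_true_iff.mp h12 with h1 | h2
        · exact ⟨["*"], List.contains_iff_mem.mp h1, by simp [pvMatches]⟩
        · exact ⟨[k], List.contains_iff_mem.mp h2, by simp [pvMatches]⟩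
      · refine ⟨[k, "*"], List.contains_iff_mem.mp h3, ?_⟩
        cases rest with
        | nil => simp [pvMatches]
        | cons r rs => simp [pvMatches]
    · rw [if_neg hc]
      simp only [Bool.or_eq_true, not_or, Bool.not_eq_true] at hc
      obtain ⟨⟨h1', h2'⟩, h3'⟩ := hc
      have hm1 : (["*"] : List String) ∉ S := fun hmem => by
        rw [List.contains_iff_mem.mpr hmem] at h1'; cases h1'
      have hm2 : ([k] : List String) ∉ S := fun hmem => by
        rw [List.contains_iff_mem.mpr hmem] at h2'; cases h2'
      have hm3 : ([k, "*"] : List String) ∉ S := fun hmem => by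
        rw [List.contains_iff_mem.mpr hmem] at h3'; cases h3'
      have hinv' : ∀ c' ∈ PySem.Set.ofList
          ((S.filter (fun c => c.headD "" == k || c.headD "" == "*")).map (fun c => c.drop 1)),
          c' ≠ [] ∧ ¬ ∃ t, c' = t ++ ["*", "*"] := by
        intro c' hc'
        rw [PySem.Set.mem_ofList] at hc'
        obtain ⟨c, hcf, rfl⟩ := List.mem_map.mp hc'
        obtain ⟨hcS, hpred⟩ := List.mem_filter.mp hcf
        obtain ⟨hne, hss⟩ := hinv c hcS
        cases c with
        | nil => exact absurd rfl hne
        | cons h tl =>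
          simp only [List.headD_cons] at hpred
          rw [List.drop_one, List.tail_cons]
          constructor
          · intro htl
            subst htl
            rcases Bool.or_eq_true_iff.mp hpred with hk | hst
            · exact hm2 (by rwa [eq_of_beq hk] at hcS)
            · exact hm1 (by rwa [eq_of_beq hst] at hcS)
          · rintro ⟨t, rfl⟩
            exact hss ⟨h :: t, rfl⟩
      have hstar' : ∀ _ : rest = [], (["*"] : List String) ∉ PySem.Set.ofList
          ((S.filter (fun c => c.headD "" == k || c.headD "" == "*")).map (fun c => c.drop 1)) := by
        intro _ hmem
        rw [PySem.Set.mem_ofList] at hmem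
        obtain ⟨c, hcf, hdrop⟩ := List.mem_map.mp hmem
        obtain ⟨hcS, hpred⟩ := List.mem_filter.mp hcf
        obtain ⟨hne, hss⟩ := hinv c hcS
        cases c with
        | nil => exact absurd rfl hne
        | cons h tl =>
          rw [List.drop_one, List.tail_cons] at hdrop
          subst hdrop
          simp only [List.headD_cons] at hpred
          rcases Bool.or_eq_true_iff.mp hpred with hk | hst
          · exact hm3 (by rwa [eq_of_beq hk] at hcS)
          · exact hss ⟨[], by rw [eq_of_beq hst]; rfl⟩
      rw [ih _ hinv' hstar', pvAny_ofList, List.any_map, List.any_filter]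
      apply PySem.List.any_congr_mem
      intro c hcS
      obtain ⟨hne, hss⟩ := hinv c hcS
      cases c with
      | nil => exact absurd rfl hne
      | cons h tl =>
        simp only [Function.comp, List.headD_cons, List.drop_one, List.tail_cons]
        by_cases hpred : (h == k || h == "*") = true
        · have htl : tl ≠ [] := by
            intro htl; subst htl
            rcases Bool.or_eq_true_iff.mp hpred with hk | hst
            · exact hm2 (by rwa [eq_of_beq hk] at hcS)
            · exact hm1 (by rwa [eq_of_beq hst] at hcS)
          rw [hpred, Bool.true_and]
          cases tl with
          | nil => exact absurd rfl htl
          | cons t0 ts =>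
            simp only [pvMatches, List.length_cons, List.zip_cons_cons, List.all_cons,
              List.getLastD_cons]
            rw [show ((h, k).1 == "*" || (h, k).1 == (h, k).2) = true by
              rcases Bool.or_eq_true_iff.mp hpred with hk | hst
              · simp [eq_of_beq hk]
              · simp [eq_of_beq hst]]
            simp only [Nat.add_le_add_iff_right, Bool.true_and]
            rfl
        · rw [Bool.not_eq_true] at hpred
          rw [hpred, Bool.false_and]
          symm
          obtain ⟨hk, hst⟩ := Bool.or_eq_false_iff.mp hpred
          simp [pvMatches, List.zip_cons_cons, List.all_cons, hk, hst]


-- characterization of the pattern index built by pvIndex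
lemma pvIndex_go (L : List (List String)) (g : PySem.Dict String (List (List String)))
    (st : List (List String)) :
    ((L.foldl (fun acc p =>
        if p.headD "" == "*" then (acc.1, acc.2 ++ [p])
        else (acc.1.modify (p.headD "") [] (fun l => l ++ [p]), acc.2)) (g, st)).2
      = st ++ L.filter (fun p => p.headD "" == "*")) ∧
    (∀ x, (L.foldl (fun acc p =>
        if p.headD "" == "*" then (acc.1, acc.2 ++ [p])
        else (acc.1.modify (p.headD "") [] (fun l => l ++ [p]), acc.2)) (g, st)).1.getD x []
      = g.getD x [] ++ L.filter (fun p => (!(p.headD "" == "*")) && (p.headD "" == x))) := by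
  induction L generalizing g st with
  | nil => simp
  | cons p L ih =>
    by_cases hstar : (p.headD "" == "*") = true
    · simp only [List.foldl_cons, hstar, if_true, List.filter_cons]
      constructor
      · rw [(ih g (st ++ [p])).1]
        simp
      · intro x
        rw [(ih g (st ++ [p])).2 x]
        simp
    · rw [Bool.not_eq_true] at hstar
      simp only [List.foldl_cons, hstar, Bool.false_eq_true, if_false, List.filter_cons]
      constructor
      · rw [(ih _ st).1]
      · intro x
        rw [(ih _ st).2 x, PySem.Dict.getD_modify]
        by_cases hx : x = p.headD ""
        · subst hx
          rw [if_pos rfl]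
          simp
        · rw [if_neg hx]
          have hbeq : (p.headD "" == x) = false := by
            simp only [beq_eq_false_iff_ne, ne_eq]
            exact fun h => hx h.symm
          simp only [List.headD_eq_head?_getD] at hbeq ⊢
          rw [hbeq]
          simp

-- splitting "some pattern matches" along the index is exact
lemma pvAny_partition (pats : List (List String)) (seq : List String)
    (hpat : ∀ p ∈ pats, p ≠ []) (hseq : seq ≠ []) :
    (((pvIndex pats).1.getD (seq.headD "") []).any (fun p => pvMatches p seq) ||
      (pvIndex pats).2.any (fun p => pvMatches p seq))
    = pats.any (fun p => pvMatches p seq) := by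
  obtain ⟨h2, h1⟩ := pvIndex_go pats PySem.Dict.empty []
  unfold pvIndex
  rw [h2, h1 (seq.headD "")]
  simp only [PySem.Dict.getD_empty, List.nil_append]
  rw [List.any_filter, List.any_filter]
  cases hrhs : pats.any (fun p => pvMatches p seq) with
  | true =>
    obtain ⟨p, hp, hf⟩ := List.any_eq_true.mp hrhs
    have hhead : (p.headD "" == "*") = true ∨
        ((p.headD "" == "*") = false ∧ (p.headD "" == seq.headD "") = true) := by
      cases p with
      | nil => exact absurd rfl (hpat [] hp)
      | cons p0 pr =>
        cases seq with
        | nil => exact absurd rfl hseq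
        | cons s0 sr =>
          simp only [pvMatches, List.zip_cons_cons, List.all_cons, Bool.and_eq_true] at hf
          obtain ⟨-, ⟨hfirst, -⟩⟩ := hf
          simp only [List.headD_cons]
          rcases Bool.or_eq_true_iff.mp hfirst with h | h
          · exact Or.inl h
          · by_cases hps : (p0 == "*") = true
            · exact Or.inl hps
            · exact Or.inr ⟨Bool.not_eq_true _ ▸ hps, h⟩
    rcases hhead with h | ⟨hns, hh⟩
    · refine Bool.or_eq_true_iff.mpr (Or.inr (List.any_eq_true.mpr ⟨p, hp, ?_⟩))
      rw [h, hf]; rfl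
    · refine Bool.or_eq_true_iff.mpr (Or.inl (List.any_eq_true.mpr ⟨p, hp, ?_⟩))
      rw [hns, hh, hf]; rfl
  | false =>
    have hall := List.any_eq_false.mp hrhs
    refine Bool.or_eq_false_iff.mpr ⟨?_, ?_⟩ <;>
    · rw [List.any_eq_false]
      intro p hp
      simp [hall p hp]

theorem subtract_valid_changes_spec : Claim_equal_subtract_valid_changes := by
  unfold Claim_equal_subtract_valid_changes
  intro diff valid_changes _
  unfold Spec_subtract_valid_changes
  unfold subtract_valid_changes subtract_valid_changes_alt
  have hnd : (PySem.Dict.ofList diff).keys.Nodup := PySem.Dict.nodup_keys_ofList diff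
  set d := PySem.Dict.ofList diff with hd
  set pats : List (List String) := valid_changes.map (fun c => pvReduceB (pvSplit c)) with hpats
  set P : String → Bool := fun key =>
    pvLoopA (pvSplit key) (PySem.Set.ofList (valid_changes.map (fun c => pvConvert c))) with hP
  set Q : String → Bool := fun key =>
    (((pvIndex pats).1.getD ((pvSplit key).headD "") []).any (fun p => pvMatches p (pvSplit key)) ||
      (pvIndex pats).2.any (fun p => pvMatches p (pvSplit key))) with hQ
  have hpat : ∀ p ∈ pats, p ≠ [] := by
    intro p hp
    rw [hpats] at hp
    obtain ⟨vc, _, rfl⟩ := List.mem_map.mp hp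
    exact pvReduceB_ne_nil _ (pvSplit_ne_nil vc)
  have hPQ : ∀ key, P key = Q key := by
    intro key
    rw [hP, hQ]
    dsimp only
    have hI : ∀ c ∈ PySem.Set.ofList (valid_changes.map (fun c => pvConvert c)),
        c ≠ [] ∧ ¬ ∃ t, c = t ++ ["*", "*"] := by
      intro c hc
      rw [PySem.Set.mem_ofList] at hc
      obtain ⟨vc, _, rfl⟩ := List.mem_map.mp hc
      simp only [pvConvert, pvReduce_eq]
      exact ⟨pvReduceB_ne_nil _ (pvSplit_ne_nil vc), pvReduceB_no_ss _⟩
    rw [pvLoopA_eq_any _ _ hI (fun h => absurd h (pvSplit_ne_nil key))]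
    rw [pvAny_ofList, pvAny_partition pats (pvSplit key) hpat (pvSplit_ne_nil key)]
    rw [hpats, List.any_map, List.any_map]
    exact PySem.List.any_congr_mem (fun c _ => by
      simp only [Function.comp, pvConvert, pvReduce_eq])
  have hA : (d.keys.foldl (fun ret key =>
        if P key then ret else ret.insert key (d.getD key "")) PySem.Dict.empty).items
      = (d.keys.filter (fun key => !P key)).map (fun key => (key, d.getD key "")) := by
    rw [show (fun (ret : PySem.Dict String String) key =>
          if P key then ret else ret.insert key (d.getD key ""))
        = (fun (ret : PySem.Dict String String) key =>
          if (!P key) = true then ret.insert key (d.getD key "") else ret) from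
      funext fun ret => funext fun key => by cases hpk : P key <;> simp]
    rw [PySem.List.foldl_if_eq_foldl_filter (fun key => !P key)
      (fun (ret : PySem.Dict String String) key => ret.insert key (d.getD key ""))]
    rw [PySem.Dict.items_foldl_insert_fresh _ (fun key => key) (fun key => d.getD key "") _
      (fun a _ => PySem.Dict.contains_empty a) (by simpa using hnd.filter _)]
    simp [PySem.Dict.empty]
  have hB : (d.items.filter (fun kv =>
        !(((pvIndex pats).1.getD ((pvSplit kv.1).headD "") []).any
            (fun p => pvMatches p (pvSplit kv.1)) ||
          (pvIndex pats).2.any (fun p => pvMatches p (pvSplit kv.1)))))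
      = (d.keys.filter (fun key => !Q key)).map (fun key => (key, d.getD key "")) := by
    rw [PySem.Dict.items_eq_map_keys d hnd "", List.filter_map]
    rfl
  rw [hA, hB]
  exact congrArg _ (List.filter_congr (fun key _ => by rw [hPQ key]))
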